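-- pv_equiv track=rewrite | github.com/digitalgoldfisj79/Voynichdecomp | v3d_p70_test.py | p70_decompose
-- ===== SOURCE A (Python) =====
-- PREFIXES = ['', 'o', 'qo', 'd', 'y', 's', 'q']
--
-- GALLOWS_P = ['', 'k', 't', 'p', 'f', 'cth', 'ckh', 'cph', 'cfh']
--
-- SUFFIXES_P = ['aiin', 'edy', 'eey', 'ody', 'ain', 'iin', 'chy',
--               'shy', 'dy', 'ey', 'in', 'ol', 'or', 'ar', 'al',
--               'am', 'an', 'ir', 'ee', 'y', 'n', 'l', 'r', 'm',
--               'h', 'e', 'g', 's', '']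
--
-- def p70_decompose(word):
--     rem = word
--     pfx = ''
--     for p in sorted([x for x in PREFIXES if x], key=len, reverse=True):
--         if rem.startswith(p):
--             pfx = p
--             rem = rem[len(p):]
--             break
--     gal = ''
--     for g in sorted([x for x in GALLOWS_P if x], key=len, reverse=True):
--         if rem.startswith(g):
--             gal = g
--             rem = rem[len(g):]
--             break
--     sfx = ''
--     for s in sorted([x for x in SUFFIXES_P if x], key=len, reverse=True):
--         if rem.endswith(s) and len(rem) > len(s):
--             sfx = s
--             rem = rem[:len(rem)-len(s)]
--             break
--     return pfx, gal, rem, sfx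
-- ===== SOURCE B (Python) =====
-- PREFIXES = ['', 'o', 'qo', 'd', 'y', 's', 'q']
--
-- GALLOWS_P = ['', 'k', 't', 'p', 'f', 'cth', 'ckh', 'cph', 'cfh']
--
-- SUFFIXES_P = ['aiin', 'edy', 'eey', 'ody', 'ain', 'iin', 'chy',
--               'shy', 'dy', 'ey', 'in', 'ol', 'or', 'ar', 'al',
--               'am', 'an', 'ir', 'ee', 'y', 'n', 'l', 'r', 'm',
--               'h', 'e', 'g', 's', '']
--
--
-- def _groups(words):
--     """Group the non-empty candidates into {length: set}, returned as
--     (length, set) pairs in descending length order."""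
--     by_len = {}
--     for w in words:
--         if w:
--             by_len.setdefault(len(w), set()).add(w)
--     return [(L, by_len[L]) for L in sorted(by_len, reverse=True)]
--
--
-- _PFX_GROUPS = _groups(PREFIXES)
-- _GAL_GROUPS = _groups(GALLOWS_P)
-- _SFX_GROUPS = _groups(SUFFIXES_P)
--
--
-- def _strip_prefix(rem, groups):
--     for L, ws in groups:
--         if len(rem) >= L and rem[:L] in ws:
--             return rem[:L], rem[L:]
--     return '', rem
--
--
-- def _strip_suffix(rem, groups):
--     for L, ws in groups:
--         if len(rem) > L and rem[-L:] in ws: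
--             return rem[:-L], rem[-L:]
--     return rem, ''
--
--
-- def p70_decompose(word):
--     pfx, rem = _strip_prefix(word, _PFX_GROUPS)
--     gal, rem = _strip_prefix(rem, _GAL_GROUPS)
--     rem, sfx = _strip_suffix(rem, _SFX_GROUPS)
--     return pfx, gal, rem, sfx
-- ===== Notes on version B (the rewrite author's own statement) =====
-- stated objective: idiomatic
-- what changed: Replaces the three linear scans over length-sorted candidate lists with length-indexed hash tables: candidates are grouped once into {length: set} dicts, and each piece is found by testing one slice per distinct length against a set, instead of calling startswith/endswith for every candidate.
import Mathlib
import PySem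

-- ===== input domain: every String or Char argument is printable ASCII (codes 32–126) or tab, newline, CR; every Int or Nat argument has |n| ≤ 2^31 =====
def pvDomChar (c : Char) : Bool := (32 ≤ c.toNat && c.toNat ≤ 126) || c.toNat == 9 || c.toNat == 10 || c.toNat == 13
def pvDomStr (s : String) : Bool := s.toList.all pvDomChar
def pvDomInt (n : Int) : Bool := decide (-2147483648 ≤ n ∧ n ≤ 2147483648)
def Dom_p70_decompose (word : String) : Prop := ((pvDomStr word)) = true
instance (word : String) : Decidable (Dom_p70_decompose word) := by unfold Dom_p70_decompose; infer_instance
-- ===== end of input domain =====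

-- B replaces A's three linear scans over length-sorted candidate lists by length-indexed
-- {length : set} tables, testing one slice per distinct candidate length (idiomatic; same result).

-- ===== PORT A =====
def pvPREFIXES : List String := ["", "o", "qo", "d", "y", "s", "q"]
def pvGALLOWS_P : List String := ["", "k", "t", "p", "f", "cth", "ckh", "cph", "cfh"]
def pvSUFFIXES_P : List String :=
  ["aiin", "edy", "eey", "ody", "ain", "iin", "chy",
   "shy", "dy", "ey", "in", "ol", "or", "ar", "al",
   "am", "an", "ir", "ee", "y", "n", "l", "r", "m",
   "h", "e", "g", "s", ""]

-- sorted([x for x in xs if x], key=len, reverse=True), taken to the List Char side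
def pvSortedCands (xs : List String) : List (List Char) :=
  (PySem.List.sorted (xs.filter (fun x => !(PySem.Str.len x == 0))) (fun x => PySem.Str.len x) true).map String.toList

-- the 'for p in …: if rem.startswith(p): …; break' loop (prefix form)
def pvLoopStart : List (List Char) → List Char → List Char × List Char
  | [], rem => ([], rem)
  | p :: ps, rem =>
      if PySem.Chars.startswith rem p then (p, PySem.List.slice rem (some (p.length : Int)) none)
      else pvLoopStart ps rem

-- the suffix loop: 'if rem.endswith(s) and len(rem) > len(s): …; break'
def pvLoopEnd : List (List Char) → List Char → List Char × List Char
  | [], rem => (rem, [])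
  | s :: ss, rem =>
      if PySem.Chars.endswith rem s && decide (s.length < rem.length) then
        (PySem.List.slice rem none (some ((rem.length : Int) - (s.length : Int))), s)
      else pvLoopEnd ss rem

def p70_decompose (word : String) : String × String × String × String :=
  let r0 := pvLoopStart (pvSortedCands pvPREFIXES) word.toList
  let r1 := pvLoopStart (pvSortedCands pvGALLOWS_P) r0.2
  let r2 := pvLoopEnd (pvSortedCands pvSUFFIXES_P) r1.2
  (String.ofList r0.1, String.ofList r1.1, String.ofList r2.1, String.ofList r2.2)

-- ===== PORT B =====
-- _groups: {length: set} over the non-empty candidates, as (length, set) pairs, lengths descending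
def pvGroups (xs : List String) : List (Int × PySem.Set (List Char)) :=
  let d : PySem.Dict Int (PySem.Set (List Char)) :=
    xs.foldl (fun d w =>
      if !(PySem.Str.len w == 0) then
        PySem.Dict.insert d (PySem.Str.len w)
          (PySem.Set.add (PySem.Dict.getD d (PySem.Str.len w) PySem.Set.empty) w.toList)
      else d) PySem.Dict.empty
  (PySem.List.sorted (PySem.Dict.keys d) (fun k => k) true).map
    (fun L => (L, PySem.Dict.getD d L PySem.Set.empty))

-- 'for L, ws in groups: if len(rem) >= L and rem[:L] in ws: return rem[:L], rem[L:]'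
def pvStripPre : List (Int × PySem.Set (List Char)) → List Char → List Char × List Char
  | [], rem => ([], rem)
  | (L, ws) :: gs, rem =>
      if decide (L ≤ (rem.length : Int)) && PySem.Set.contains ws (PySem.List.slice rem none (some L)) then
        (PySem.List.slice rem none (some L), PySem.List.slice rem (some L) none)
      else pvStripPre gs rem

-- 'for L, ws in groups: if len(rem) > L and rem[-L:] in ws: return rem[:-L], rem[-L:]'
def pvStripSuf : List (Int × PySem.Set (List Char)) → List Char → List Char × List Char
  | [], rem => (rem, [])
  | (L, ws) :: gs, rem =>
      if decide (L < (rem.length : Int)) && PySem.Set.contains ws (PySem.List.slice rem (some (-L)) none) then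
        (PySem.List.slice rem none (some (-L)), PySem.List.slice rem (some (-L)) none)
      else pvStripSuf gs rem

def p70_decompose_alt (word : String) : String × String × String × String :=
  let r0 := pvStripPre (pvGroups pvPREFIXES) word.toList
  let r1 := pvStripPre (pvGroups pvGALLOWS_P) r0.2
  let r2 := pvStripSuf (pvGroups pvSUFFIXES_P) r1.2
  (String.ofList r0.1, String.ofList r1.1, String.ofList r2.1, String.ofList r2.2)

-- ===== PRECONDITION & SPEC =====
def Spec_p70_decompose (word : String) (out : String × String × String × String) : Prop := out = p70_decompose_alt word
instance (word : String) (out : String × String × String × String) : Decidable (Spec_p70_decompose word out) := by unfold Spec_p70_decompose; infer_instance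

-- ===== CLAIM (what is proved, stated in full; the proofs are below) =====
def Claim_equal_p70_decompose : Prop := ∀ (word : String), Dom_p70_decompose word → Spec_p70_decompose word (p70_decompose word)

-- ===== LEMMAS AND PROOFS =====

-- A's loop over one same-length group of candidates equals one slice-membership test.
theorem pvLoopStart_group (L : Nat) (cs rest : List (List Char))
    (h : ∀ c ∈ cs, c.length = L) (rem : List Char) :
    pvLoopStart (cs ++ rest) rem =
      if L ≤ rem.length ∧ rem.take L ∈ cs then (rem.take L, rem.drop L)
      else pvLoopStart rest rem := by
  induction cs with
  | nil => simp
  | cons c cs ih =>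
    have hcL : c.length = L := h c (List.mem_cons_self ..)
    by_cases hp : PySem.Chars.startswith rem c = true
    · have hpre : c <+: rem := (PySem.Chars.startswith_iff rem c).mp hp
      have htake : rem.take L = c := by
        have := List.prefix_iff_eq_take.mp hpre
        rw [hcL] at this; exact this.symm
      have hle : L ≤ rem.length := by
        have := hpre.length_le; omega
      simp only [List.cons_append, pvLoopStart, hp, if_true, hcL,
        PySem.List.slice_from_natCast]
      simp [htake, hle]
    · have hne : L ≤ rem.length → rem.take L ≠ c := by
        intro _ hEq
        exact hp ((PySem.Chars.startswith_iff rem c).mpr (hEq ▸ List.take_prefix L rem))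
      simp only [List.cons_append, pvLoopStart, hp, if_false, Bool.false_eq_true]
      rw [ih (fun x hx => h x (List.mem_cons_of_mem _ hx))]
      apply if_congr _ rfl rfl
      constructor
      · rintro ⟨h1, h2⟩; exact ⟨h1, List.mem_cons_of_mem _ h2⟩
      · rintro ⟨h1, h2⟩
        refine ⟨h1, ?_⟩
        rcases List.mem_cons.mp h2 with hEq | hmem
        · exact absurd hEq (hne h1)
        · exact hmem

-- same for the suffix loop with the strict length guard
theorem pvLoopEnd_group (L : Nat) (cs rest : List (List Char))
    (h : ∀ c ∈ cs, c.length = L) (rem : List Char) :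
    pvLoopEnd (cs ++ rest) rem =
      if L < rem.length ∧ rem.drop (rem.length - L) ∈ cs then
        (rem.take (rem.length - L), rem.drop (rem.length - L))
      else pvLoopEnd rest rem := by
  induction cs with
  | nil => simp
  | cons c cs ih =>
    have hcL : c.length = L := h c (List.mem_cons_self ..)
    by_cases hp : (PySem.Chars.endswith rem c && decide (c.length < rem.length)) = true
    · rw [Bool.and_eq_true, decide_eq_true_eq] at hp
      obtain ⟨he, hlt⟩ := hp
      have hsuf : c <:+ rem := (PySem.Chars.endswith_iff rem c).mp he
      have hdrop : rem.drop (rem.length - L) = c := by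
        have := List.suffix_iff_eq_drop.mp hsuf
        rw [hcL] at this; exact this.symm
      have hlt' : L < rem.length := by omega
      have hcast : (rem.length : Int) - (c.length : Int) = ((rem.length - L : Nat) : Int) := by
        rw [hcL]; omega
      simp only [List.cons_append, pvLoopEnd, he, hlt, decide_true, Bool.and_self, if_true,
        hcast, PySem.List.slice_to_natCast]
      simp [hdrop, hlt']
    · have hne : L < rem.length → rem.drop (rem.length - L) ≠ c := by
        intro hlt hEq
        apply hp
        rw [Bool.and_eq_true, decide_eq_true_eq]
        refine ⟨(PySem.Chars.endswith_iff rem c).mpr (hEq ▸ List.drop_suffix _ rem), by omega⟩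
      simp only [List.cons_append, pvLoopEnd, hp, if_false, Bool.false_eq_true]
      rw [ih (fun x hx => h x (List.mem_cons_of_mem _ hx))]
      apply if_congr _ rfl rfl
      constructor
      · rintro ⟨h1, h2⟩; exact ⟨h1, List.mem_cons_of_mem _ h2⟩
      · rintro ⟨h1, h2⟩
        refine ⟨h1, ?_⟩
        rcases List.mem_cons.mp h2 with hEq | hmem
        · exact absurd hEq (hne h1)
        · exact hmem

-- the concrete candidate sequences of A, split into same-length groups
theorem pvCands_pfx : pvSortedCands pvPREFIXES =
    [['q','o']] ++ ([['o'],['d'],['y'],['s'],['q']] ++ []) := by decide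
theorem pvCands_gal : pvSortedCands pvGALLOWS_P =
    [['c','t','h'],['c','k','h'],['c','p','h'],['c','f','h']] ++ ([['k'],['t'],['p'],['f']] ++ []) := by decide
theorem pvCands_sfx : pvSortedCands pvSUFFIXES_P =
    [['a','i','i','n']] ++
    ([['e','d','y'],['e','e','y'],['o','d','y'],['a','i','n'],['i','i','n'],['c','h','y'],['s','h','y']] ++
    ([['d','y'],['e','y'],['i','n'],['o','l'],['o','r'],['a','r'],['a','l'],['a','m'],['a','n'],['i','r'],['e','e']] ++
    ([['y'],['n'],['l'],['r'],['m'],['h'],['e'],['g'],['s']] ++ []))) := by decide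

-- the concrete group tables of B
theorem pvGroups_pfx : pvGroups pvPREFIXES =
    [(((2:Nat):Int), [['q','o']]), (((1:Nat):Int), [['o'],['d'],['y'],['s'],['q']])] := by decide
theorem pvGroups_gal : pvGroups pvGALLOWS_P =
    [(((3:Nat):Int), [['c','t','h'],['c','k','h'],['c','p','h'],['c','f','h']]), (((1:Nat):Int), [['k'],['t'],['p'],['f']])] := by decide
theorem pvGroups_sfx : pvGroups pvSUFFIXES_P =
    [(((4:Nat):Int), [['a','i','i','n']]),
     (((3:Nat):Int), [['e','d','y'],['e','e','y'],['o','d','y'],['a','i','n'],['i','i','n'],['c','h','y'],['s','h','y']]),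
     (((2:Nat):Int), [['d','y'],['e','y'],['i','n'],['o','l'],['o','r'],['a','r'],['a','l'],['a','m'],['a','n'],['i','r'],['e','e']]),
     (((1:Nat):Int), [['y'],['n'],['l'],['r'],['m'],['h'],['e'],['g'],['s']])] := by decide

-- one group step of B's prefix loop, in the same shape as pvLoopStart_group's RHS
theorem pvStripPre_step (L : Nat) (ws : PySem.Set (List Char))
    (gs : List (Int × PySem.Set (List Char))) (rem : List Char) :
    pvStripPre (((L : Int), ws) :: gs) rem =
      if L ≤ rem.length ∧ rem.take L ∈ ws then (rem.take L, rem.drop L)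
      else pvStripPre gs rem := by
  simp only [pvStripPre, PySem.List.slice_to_natCast, PySem.List.slice_from_natCast]
  apply if_congr _ rfl rfl
  simp [PySem.Set.contains]

theorem pvStripSuf_step (L : Nat) (hL : 0 < L) (ws : PySem.Set (List Char))
    (gs : List (Int × PySem.Set (List Char))) (rem : List Char) :
    pvStripSuf (((L : Int), ws) :: gs) rem =
      if L < rem.length ∧ rem.drop (rem.length - L) ∈ ws then
        (rem.take (rem.length - L), rem.drop (rem.length - L))
      else pvStripSuf gs rem := by
  simp only [pvStripSuf, PySem.List.slice_to_neg_natCast _ _ hL, PySem.List.slice_from_neg_natCast _ _ hL]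
  apply if_congr _ rfl rfl
  simp [PySem.Set.contains]

-- the three stages agree pointwise
theorem stage_pfx (rem : List Char) :
    pvLoopStart (pvSortedCands pvPREFIXES) rem = pvStripPre (pvGroups pvPREFIXES) rem := by
  rw [pvCands_pfx, pvGroups_pfx,
    pvLoopStart_group 2 _ _ (by decide), pvLoopStart_group 1 _ _ (by decide),
    pvStripPre_step 2, pvStripPre_step 1]
  rfl

theorem stage_gal (rem : List Char) :
    pvLoopStart (pvSortedCands pvGALLOWS_P) rem = pvStripPre (pvGroups pvGALLOWS_P) rem := by
  rw [pvCands_gal, pvGroups_gal,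
    pvLoopStart_group 3 _ _ (by decide), pvLoopStart_group 1 _ _ (by decide),
    pvStripPre_step 3, pvStripPre_step 1]
  rfl

theorem stage_sfx (rem : List Char) :
    pvLoopEnd (pvSortedCands pvSUFFIXES_P) rem = pvStripSuf (pvGroups pvSUFFIXES_P) rem := by
  rw [pvCands_sfx, pvGroups_sfx,
    pvLoopEnd_group 4 _ _ (by decide), pvLoopEnd_group 3 _ _ (by decide),
    pvLoopEnd_group 2 _ _ (by decide), pvLoopEnd_group 1 _ _ (by decide),
    pvStripSuf_step 4 (by omega), pvStripSuf_step 3 (by omega),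
    pvStripSuf_step 2 (by omega), pvStripSuf_step 1 (by omega)]
  rfl

-- ===== VERDICT (by name: the statement is the Claim_ definition above) =====
theorem p70_decompose_spec : Claim_equal_p70_decompose := by
  intro word _
  unfold Spec_p70_decompose p70_decompose p70_decompose_alt
  simp only [stage_pfx, stage_gal, stage_sfx]
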